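-- pv_equiv track=rewrite | github.com/classroom-fundamentos-de-analitica/lab---python-basico-samuelespinosa | preguntas.py | formating
-- ===== SOURCE A (Python) =====
-- def formating(str):
--     output = ""
--     quoting = False
--     for char in str:
--         if char.isalnum():
--             if not quoting:
--                 output += '"'
--                 quoting = True
--         elif quoting:
--             output += '"'
--             quoting = False
--         output += char
--     return output
-- ===== SOURCE B (Python) =====
-- def formating(str):
--     keys = [c.isalnum() for c in str]
--     prevs = [False] + keys[:-1]
--     return "".join('"' + c if k != p else c for c, k, p in zip(str, keys, prevs))
-- ===== Notes on version B (the rewrite author's own statement) =====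
-- stated objective: alternative
-- what changed: Replaces A's mutable quoting flag and stateful per-character loop by a stateless boundary formulation: precompute each character's isalnum classification and its predecessor's, then join, inserting a quote exactly where the classification changes.
import Mathlib
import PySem

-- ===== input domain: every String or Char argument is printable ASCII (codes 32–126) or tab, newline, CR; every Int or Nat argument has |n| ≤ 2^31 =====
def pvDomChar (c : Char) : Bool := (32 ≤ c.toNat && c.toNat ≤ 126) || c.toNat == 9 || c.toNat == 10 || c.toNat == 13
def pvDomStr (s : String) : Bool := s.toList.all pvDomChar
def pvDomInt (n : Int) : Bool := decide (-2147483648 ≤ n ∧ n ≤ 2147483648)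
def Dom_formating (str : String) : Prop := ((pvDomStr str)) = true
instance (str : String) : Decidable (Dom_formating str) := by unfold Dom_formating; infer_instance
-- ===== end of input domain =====

-- B replaces A's stateful quoting flag by a boundary comparison of each character's
-- isalnum classification with its predecessor's (objective: alternative decomposition).

-- ===== PORT A =====
-- literal transliteration of A's loop: state = (output, quoting)
def formating (str : String) : String :=
  (str.toList.foldl
    (fun (st : String × Bool) char =>
      let st :=
        if PySem.Chars.isalnum char then
          if !st.2 then (st.1 ++ "\"", true) else st
        else if st.2 then (st.1 ++ "\"", false)
        else st
      (st.1 ++ char.toString, st.2))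
    ("", false)).1

-- ===== PORT B =====
-- literal transliteration of Source B: keys, prevs = False :: keys[:-1], join over zip
def formating_alt (str : String) : String :=
  let l := str.toList
  let keys := l.map PySem.Chars.isalnum
  let prevs := false :: keys.dropLast
  PySem.Str.join "" ((l.zip (keys.zip prevs)).map
    (fun ckp => if ckp.2.1 != ckp.2.2 then "\"" ++ ckp.1.toString else ckp.1.toString))

-- ===== PRECONDITION & SPEC =====
def Spec_formating (str : String) (out : String) : Prop := out = formating_alt str
instance (str : String) (out : String) : Decidable (Spec_formating str out) := by unfold Spec_formating; infer_instance

-- ===== CLAIM (what is proved, stated in full; the proofs are below) =====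
def Claim_equal_formating : Prop := ∀ (str : String), Dom_formating str → Spec_formating str (formating str)

-- ===== LEMMAS AND PROOFS =====

-- common characterisation (over lists): output produced from quoting state q
def pvGoL (q : Bool) : List Char → List Char
  | [] => []
  | c :: cs =>
      (if PySem.Chars.isalnum c != q then ['"'] else []) ++ c :: pvGoL (PySem.Chars.isalnum c) cs

lemma pvA_go (l : List Char) : ∀ (out : String) (q : Bool),
    ((l.foldl
      (fun (st : String × Bool) char =>
        let st :=
          if PySem.Chars.isalnum char then
            if !st.2 then (st.1 ++ "\"", true) else st
          else if st.2 then (st.1 ++ "\"", false)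
          else st
        (st.1 ++ char.toString, st.2))
      (out, q)).1).toList = out.toList ++ pvGoL q l := by
  induction l with
  | nil => intro out q; simp [pvGoL]
  | cons c cs ih =>
      intro out q
      simp at ih
      simp only [List.foldl_cons]
      by_cases h : PySem.Chars.isalnum c = true <;>
        cases q <;>
        simp [h, pvGoL, ih]

lemma pvZip_dropLast {α : Type} (a : Bool) (ks : List Bool) (l : List α) :
    l.zip (ks.zip ((a :: ks).dropLast)) = l.zip (ks.zip (a :: ks.dropLast)) := by
  cases ks with
  | nil => cases l <;> simp
  | cons k ks => simp

lemma pvJoinNil : ∀ (xs : List (List Char)), PySem.Chars.join [] xs = xs.flatten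
  | [] => by simp [PySem.Chars.join, List.intercalate]
  | [a] => by simp [PySem.Chars.join, List.intercalate]
  | a :: b :: t => by
      rw [PySem.Chars.join_cons_cons, pvJoinNil (b :: t)]; simp

lemma pvB_go (l : List Char) : ∀ (q : Bool),
    (PySem.Str.join "" ((l.zip ((l.map PySem.Chars.isalnum).zip
        (q :: (l.map PySem.Chars.isalnum).dropLast))).map
      (fun ckp => if ckp.2.1 != ckp.2.2 then "\"" ++ ckp.1.toString else ckp.1.toString))).toList
      = pvGoL q l := by
  induction l with
  | nil => intro q; simp [pvGoL, PySem.Str.join, PySem.Chars.join, List.intercalate]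
  | cons c cs ih =>
      intro q
      specialize ih (PySem.Chars.isalnum c)
      simp only [List.map_cons, List.zip_cons_cons, pvZip_dropLast, List.map] at *
      rw [PySem.Str.toList_join] at *
      simp only [show ("".toList) = ([]:List Char) from rfl] at *
      rw [pvJoinNil] at *
      by_cases h : PySem.Chars.isalnum c = q <;>
        simp_all [pvGoL]

-- ===== VERDICT (by name: the statement is the Claim_ definition above) =====
theorem formating_spec : Claim_equal_formating := by
  intro str _
  unfold Spec_formating formating formating_alt
  apply String.toList_inj.mp
  rw [pvA_go, pvB_go]
  simp
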